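-- pv_equiv track=rewrite | github.com/markyangliu/QuadraticSieve | quadratic_sieve.py | matrix_convert_to_list
-- ===== SOURCE A (Python) =====
-- def matrix_convert_to_list(m, size):
--     lst = []
--     for row in m:
--         new_row = []
--         for i in range(size):
--             if row & (1 << i):
--                 new_row.append(1)
--             else:
--                 new_row.append(0)
--         lst.append(new_row)
--
--     return lst
-- ===== SOURCE B (Python) =====
-- def matrix_convert_to_list(m, size):
--     if size <= 0:
--         return [[] for _ in m]
--     mask = (1 << size) - 1
--     return [[int(c) for c in format(row & mask, 'b').zfill(size)[::-1]] for row in m]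
-- ===== Notes on version B (the rewrite author's own statement) =====
-- stated objective: alternative
-- what changed: B masks each row to its low `size` bits once and extracts the bits through binary string formatting (format(...,'b').zfill(size) reversed, one int(c) per character) instead of testing row & (1 << i) at every index.
import Mathlib
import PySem

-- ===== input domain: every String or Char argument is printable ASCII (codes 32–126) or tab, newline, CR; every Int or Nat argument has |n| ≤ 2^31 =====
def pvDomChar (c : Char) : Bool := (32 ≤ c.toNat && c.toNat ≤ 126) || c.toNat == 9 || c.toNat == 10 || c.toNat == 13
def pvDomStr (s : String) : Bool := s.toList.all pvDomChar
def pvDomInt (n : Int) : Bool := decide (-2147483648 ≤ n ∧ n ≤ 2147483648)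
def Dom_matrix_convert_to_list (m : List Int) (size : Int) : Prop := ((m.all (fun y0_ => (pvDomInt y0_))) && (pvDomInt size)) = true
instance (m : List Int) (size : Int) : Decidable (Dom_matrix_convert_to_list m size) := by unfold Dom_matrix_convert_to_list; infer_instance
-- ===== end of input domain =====

-- B masks each row once and reads its bits off a reversed zero-padded binary string
-- instead of testing row & (1 << i) at each index (alternative decomposition, similar cost).


-- ===== PORT A =====
def matrix_convert_to_list (m : List Int) (size : Int) : List (List Int) :=
  m.foldl (fun lst row =>
    lst ++ [ (PySem.List.pyRange 0 size 1).foldl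
      (fun new_row i =>
        if PySem.Int.band row ((1:Int) <<< i.toNat) ≠ 0 then new_row ++ [1] else new_row ++ [0])
      [] ]) []

-- ===== PORT B =====
-- format(n, 'b') for n > 0: binary digits MSB-first (hand port, exact for nonnegative n;
-- format emits no digits for this recursion at n = 0, the '0' case is handled in pvBinStr)
def pvBinGo (n : Nat) : List Char :=
  if n = 0 then [] else pvBinGo (n / 2) ++ [if n % 2 = 1 then '1' else '0']

-- format(n, 'b') on a nonnegative int: '0' for 0, MSB-first digits otherwise (exact)
def pvBinStr (n : Nat) : List Char := if n = 0 then ['0'] else pvBinGo n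

-- .zfill(w) on a nonempty digit string: pad with '0' on the left to length w (exact: no sign char)
def pvZfill (s : List Char) (w : Nat) : List Char := List.replicate (w - s.length) '0' ++ s

def matrix_convert_to_list_alt (m : List Int) (size : Int) : List (List Int) :=
  if size ≤ 0 then m.map (fun _ => ([] : List Int))
  else
    m.map (fun row =>
      -- row & mask is nonnegative (mask ≥ 0), so .toNat is exact here;
      -- [::-1] is .reverse; int(c) on a binary digit c is code(c) - 48 (exact on digits)
      ((pvZfill (pvBinStr (PySem.Int.band row (((1:Int) <<< size.toNat) - 1)).toNat)
          size.toNat).reverse).map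
        (fun c => ((c.toNat : Int) - 48)))

-- ===== PRECONDITION & SPEC =====
def Spec_matrix_convert_to_list (m : List Int) (size : Int) (out : List (List Int)) : Prop := out = matrix_convert_to_list_alt m size
instance (m : List Int) (size : Int) (out : List (List Int)) : Decidable (Spec_matrix_convert_to_list m size out) := by unfold Spec_matrix_convert_to_list; infer_instance

-- ===== CLAIM (what is proved, stated in full; the proofs are below) =====
def Claim_equal_matrix_convert_to_list : Prop := ∀ (m : List Int) (size : Int), Dom_matrix_convert_to_list m size → Spec_matrix_convert_to_list m size (matrix_convert_to_list m size)

-- ===== LEMMAS AND PROOFS =====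

-- the bit Python reads at position j of a two's-complement integer, as a Bool
def pvTest (r : Int) (j : Nat) : Bool :=
  match r with
  | Int.ofNat n => Nat.testBit n j
  | Int.negSucc m => !(Nat.testBit m j)

lemma pv_shl_eq (j : Nat) : ((1:Int) <<< j) = ((2^j : Nat) : Int) := by
  simp [Int.shiftLeft_eq]

-- A's bit test, characterised through pvTest on both signs of the row
lemma pv_band_two_pow_ne (r : Int) (j : Nat) :
    (PySem.Int.band r ((1:Int) <<< j) ≠ 0) ↔ pvTest r j = true := by
  rw [pv_shl_eq]
  cases r with
  | ofNat n =>
    rw [show ((Int.ofNat n) : Int) = ((n:Nat):Int) from rfl, PySem.Int.band_natCast]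
    simp [pvTest, Nat.and_two_pow]
  | negSucc m =>
    rw [PySem.Int.band.eq_1]
    have h1 : ¬ (0:Int) ≤ Int.negSucc m := by omega
    have h2 : (0:Int) ≤ ((2^j : Nat) : Int) := by positivity
    simp only [h1, h2, if_true, if_false]
    have h3 : (-(Int.negSucc m) - 1) = (m : Int) := by omega
    rw [h3]
    simp only [Int.toNat_natCast]
    rw [Nat.and_comm, Nat.and_two_pow]
    by_cases hb : Nat.testBit m j <;> simp [pvTest, hb]

-- for r < 2^s, subtracting from the all-ones mask flips each of the s low bits
lemma pv_sub_testBit (s : Nat) (k r : Nat) (h : r < 2^s) (hk : k < s) :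
    (2^s - 1 - r).testBit k = ! r.testBit k := by
  induction s generalizing r k with
  | zero => omega
  | succ s ih =>
    have h2 : 2^(s+1) = 2 * 2^s := by ring
    cases k with
    | zero =>
      simp only [Nat.testBit_zero]
      have hp : 0 < 2^s := Nat.two_pow_pos s
      rcases Nat.mod_two_eq_zero_or_one r with hr | hr <;> simp [hr] <;> omega
    | succ k =>
      rw [Nat.testBit_add_one, Nat.testBit_add_one]
      have hdiv : (2^(s+1) - 1 - r) / 2 = 2^s - 1 - r / 2 := by omega
      rw [hdiv]
      exact ih k (r/2) (by omega) (by omega)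

-- masking with 2^s - 1 selects exactly the low s two's-complement bits
lemma pv_band_mask_testBit (r : Int) (s k : Nat) (hk : k < s) :
    (PySem.Int.band r (((1:Int) <<< s) - 1)).toNat.testBit k = pvTest r k := by
  have hcast : (((1:Int) <<< s) - 1) = ((2^s - 1 : Nat) : Int) := by
    rw [pv_shl_eq]
    have : 1 ≤ 2^s := Nat.one_le_two_pow
    push_cast [this]
    ring
  rw [hcast]
  cases r with
  | ofNat n =>
    rw [show ((Int.ofNat n) : Int) = ((n:Nat):Int) from rfl, PySem.Int.band_natCast,
      Int.toNat_natCast, Nat.and_two_pow_sub_one_eq_mod, Nat.testBit_mod_two_pow]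
    simp [pvTest, hk]
  | negSucc m =>
    rw [PySem.Int.band.eq_1]
    have h1 : ¬ (0:Int) ≤ Int.negSucc m := by omega
    have h2 : (0:Int) ≤ ((2^s - 1 : Nat) : Int) := by positivity
    simp only [h1, h2, if_true, if_false]
    have h3 : (-(Int.negSucc m) - 1) = (m : Int) := by omega
    rw [h3]
    simp only [Int.toNat_natCast]
    rw [Nat.and_comm, Nat.and_two_pow_sub_one_eq_mod]
    have hm : m % 2^s < 2^s := Nat.mod_lt _ (Nat.two_pow_pos s)
    rw [pv_sub_testBit s k (m % 2^s) hm hk, Nat.testBit_mod_two_pow]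
    simp [pvTest, hk]

-- the masked value is nonnegative and below 2^s
lemma pv_band_mask_lt (r : Int) (s : Nat) :
    (PySem.Int.band r (((1:Int) <<< s) - 1)).toNat < 2^s := by
  have hcast : (((1:Int) <<< s) - 1) = ((2^s - 1 : Nat) : Int) := by
    rw [pv_shl_eq]
    have : 1 ≤ 2^s := Nat.one_le_two_pow
    push_cast [this]
    ring
  rw [hcast]
  have hp : 0 < 2^s := Nat.two_pow_pos s
  cases r with
  | ofNat n =>
    rw [show ((Int.ofNat n) : Int) = ((n:Nat):Int) from rfl, PySem.Int.band_natCast,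
      Int.toNat_natCast]
    have := Nat.and_le_right (n := n) (m := 2^s - 1)
    omega
  | negSucc m =>
    rw [PySem.Int.band.eq_1]
    have h1 : ¬ (0:Int) ≤ Int.negSucc m := by omega
    have h2 : (0:Int) ≤ ((2^s - 1 : Nat) : Int) := by positivity
    simp only [h1, h2, if_true, if_false]
    rw [Int.toNat_natCast]
    omega

-- A's inner loop as a map over List.range
lemma pv_ite_append (c : Prop) [Decidable c] (a : List Int) :
    (if c then a ++ [(1:Int)] else a ++ [0]) = a ++ [if c then 1 else 0] := by
  split_ifs <;> rfl

lemma pv_A_row (row : Int) (size : Int) :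
    (PySem.List.pyRange 0 size 1).foldl
      (fun new_row i =>
        if PySem.Int.band row ((1:Int) <<< i.toNat) ≠ 0 then new_row ++ [1] else new_row ++ [0])
      []
    = (List.range size.toNat).map
        (fun (k : Nat) => if PySem.Int.band row ((1:Int) <<< k) ≠ 0 then (1:Int) else 0) := by
  simp only [pv_ite_append, PySem.List.foldl_append_singleton_eq_map, PySem.List.pyRange_one,
    List.map_map, List.nil_append, Int.sub_zero]
  apply List.map_congr_left
  intro k _
  simp only [Function.comp]
  norm_num [Int.shiftLeft_natCast_right]

-- bits of 0 over range s are all '0'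
lemma pv_map_zero (s : Nat) :
    (List.range s).map (fun k => if (0:Nat).testBit k then '1' else '0') = List.replicate s '0' := by
  simp [Nat.zero_testBit, List.map_const']

-- the reversed, zero-padded binary digits of n < 2^s are its s low bits, LSB-first
lemma pv_binGo_key (s : Nat) (n : Nat) (h : n < 2^s) :
    (pvBinGo n).reverse ++ List.replicate (s - (pvBinGo n).length) '0'
      = (List.range s).map (fun k => if n.testBit k then '1' else '0') := by
  induction s generalizing n with
  | zero =>
    have : n = 0 := by omega
    subst this
    rw [pvBinGo]
    simp
  | succ s ih =>
    by_cases hn : n = 0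
    · subst hn
      rw [pvBinGo, pv_map_zero]
      simp
    · rw [pvBinGo, if_neg hn]
      have hlen : (pvBinGo (n/2) ++ [if n % 2 = 1 then '1' else '0']).length
          = (pvBinGo (n/2)).length + 1 := by simp
      rw [List.reverse_append, hlen]
      simp only [List.reverse_cons, List.reverse_nil, List.nil_append, List.cons_append]
      have hd : n / 2 < 2^s := by
        have : 2^(s+1) = 2^s * 2 := by ring
        omega
      have := ih (n/2) hd
      rw [show s + 1 - ((pvBinGo (n/2)).length + 1) = s - (pvBinGo (n/2)).length by omega]
      rw [List.range_succ_eq_map, List.map_cons, List.map_map]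
      congr 1
      · rcases Nat.mod_two_eq_zero_or_one n with h2 | h2 <;>
          simp [Nat.testBit_zero, h2]
      · rw [this]
        apply List.map_congr_left
        intro k _
        simp [Function.comp, Nat.testBit_add_one]

-- the same for pvBinStr (which returns '0' for 0), for s ≥ 1
lemma pv_binStr_key (s : Nat) (n : Nat) (hs : 1 ≤ s) (h : n < 2^s) :
    (pvZfill (pvBinStr n) s).reverse
      = (List.range s).map (fun k => if n.testBit k then '1' else '0') := by
  rw [pvZfill, List.reverse_append, List.reverse_replicate]
  by_cases hn : n = 0
  · subst hn
    have h1 : pvBinStr 0 = ['0'] := by rw [pvBinStr]; simp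
    rw [h1, pv_map_zero]
    simp only [List.length_cons, List.length_nil, List.reverse_cons, List.reverse_nil,
      List.nil_append, List.cons_append]
    rw [← List.replicate_succ, show (s - 1) + 1 = s by omega]
  · rw [pvBinStr, if_neg hn]
    exact pv_binGo_key s n h

-- ===== VERDICT (by name: the statement is the Claim_ definition above) =====
theorem matrix_convert_to_list_spec : Claim_equal_matrix_convert_to_list := by
  intro m size _
  unfold Spec_matrix_convert_to_list matrix_convert_to_list matrix_convert_to_list_alt
  rw [PySem.List.foldl_append_singleton_eq_map, List.nil_append]
  by_cases hsz : size ≤ 0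
  · rw [if_pos hsz]
    apply List.map_congr_left
    intro row _
    rw [pv_A_row]
    have : size.toNat = 0 := by omega
    rw [this]
    simp
  · rw [if_neg hsz]
    apply List.map_congr_left
    intro row _
    rw [pv_A_row]
    have hs1 : 1 ≤ size.toNat := by omega
    have hlt : (PySem.Int.band row (((1:Int) <<< size.toNat) - 1)).toNat < 2^size.toNat :=
      pv_band_mask_lt row size.toNat
    rw [pv_binStr_key size.toNat _ hs1 hlt, List.map_map]
    apply List.map_congr_left
    intro k hk
    simp only [List.mem_range] at hk
    simp only [Function.comp]
    rw [pv_band_mask_testBit row size.toNat k hk]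
    rw [show (if PySem.Int.band row ((1:Int) <<< k) ≠ 0 then (1:Int) else 0)
        = (if pvTest row k then (1:Int) else 0) by
      by_cases h : PySem.Int.band row ((1:Int) <<< k) ≠ 0
      · rw [if_pos h, if_pos ((pv_band_two_pow_ne row k).mp h)]
      · rw [if_neg h, if_neg (fun hc => h ((pv_band_two_pow_ne row k).mpr hc))]]
    by_cases hb : pvTest row k <;> simp [hb]
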